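-- pv_equiv track=rewrite | github.com/KSEHano/AutoCrochetGeneration | src/print_pattern.py | pattern_to_str
-- ===== SOURCE A (Python) =====
-- def pattern_to_str(instructions: dict, sample_points: dict, prev_rows: int = 0):
--     """
--     turns instruction into string with number of stitches
--
--     Parameters
--     ----------
--     instructions: dict
--         dict of instructions
--
--     sample_points: dict
--         dict of points
--
--     prev_rows: int = 0
--         is this a continuations
--
--     Returns
--     --------
--         text
--             str of pattern with summarized rows
--
--     """
--     repetition_start = 0
--     counter = 0
--     text = []
--
--     for ind, row in instructions.items():
--         if ind == 0:
--             text.append(f'Row {ind + 1}: {len(sample_points[ind + 1])}sc in mR [{len(sample_points[ind + 1])}]')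
--         else:
--             try:
--                 nextrow = instructions[ind+1]
--             except KeyError:
--                 nextrow = None
--
--
--             if row == nextrow:
--                 if counter == 0:
--                     repetition_start = ind
--                 counter += 1
--
--
--             else:
--                 if counter == 0:
--                     # drawString line with number
--                     rowt = f'Row {ind + 1 + prev_rows}: {row} [{len(sample_points[ind + 1])}]'
--                     pass
--
--                 else:
--                     # calculate lines
--                     rowt = f'Row {repetition_start + 1 + prev_rows} - {ind + 1 + prev_rows}: {row} [{len(sample_points[ind + 1])}]'
--
--                     pass
--                 text.append(f'{rowt}')
--                 counter = 0
--
--             if ind%5 == 0: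
--                 text.append(" ")
--
--     return text
-- ===== SOURCE B (Python) =====
-- def pattern_to_str(instructions: dict, sample_points: dict, prev_rows: int = 0):
--     # Pass 1: map each run-end index to its formatted row text.
--     row_text = {}
--     start = None
--     for ind, row in instructions.items():
--         if ind == 0:
--             continue
--         if instructions.get(ind + 1) == row:
--             if start is None:
--                 start = ind
--         else:
--             n = len(sample_points[ind + 1])
--             if start is None:
--                 row_text[ind] = f'Row {ind + 1 + prev_rows}: {row} [{n}]'
--             else:
--                 row_text[ind] = f'Row {start + 1 + prev_rows} - {ind + 1 + prev_rows}: {row} [{n}]'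
--             start = None
--     # Pass 2: assemble the output with spacers.
--     text = []
--     for ind in instructions:
--         if ind == 0:
--             n = len(sample_points[1])
--             text.append(f'Row 1: {n}sc in mR [{n}]')
--         else:
--             if ind in row_text:
--                 text.append(row_text[ind])
--             if ind % 5 == 0:
--                 text.append(" ")
--     return text
-- ===== Notes on version B (the rewrite author's own statement) =====
-- stated objective: alternative
-- what changed: Replaces A's single stateful loop (counter/repetition_start interleaving row texts and spacers inline) by two passes: a first pass builds a dict mapping each run-end index to its formatted row string, a second pass assembles the output from that table plus the spacers.
import Mathlib
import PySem

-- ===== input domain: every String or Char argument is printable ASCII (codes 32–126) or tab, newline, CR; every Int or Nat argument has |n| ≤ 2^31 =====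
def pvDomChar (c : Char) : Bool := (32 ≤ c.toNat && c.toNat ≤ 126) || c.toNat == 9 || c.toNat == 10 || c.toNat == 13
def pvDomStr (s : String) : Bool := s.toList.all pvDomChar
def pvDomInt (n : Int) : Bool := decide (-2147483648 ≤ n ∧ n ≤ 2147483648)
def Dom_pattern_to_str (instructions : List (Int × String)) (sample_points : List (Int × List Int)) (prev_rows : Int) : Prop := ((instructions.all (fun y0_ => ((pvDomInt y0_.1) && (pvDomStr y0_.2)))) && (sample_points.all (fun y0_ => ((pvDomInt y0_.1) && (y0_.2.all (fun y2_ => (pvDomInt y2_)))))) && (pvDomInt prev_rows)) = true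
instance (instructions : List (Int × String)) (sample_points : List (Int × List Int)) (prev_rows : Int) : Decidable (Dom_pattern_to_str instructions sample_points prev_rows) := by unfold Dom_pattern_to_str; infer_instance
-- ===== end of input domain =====

-- B rewrites A's single stateful loop as two passes (run-end table, then assembly); equivalence of the RETURN value is proved on Pre_.

-- ===== PORT A =====
-- one iteration of A's for-loop; state = (repetition_start, counter, text)
def pvAstep (instr : PySem.Dict Int String) (sp : PySem.Dict Int (List Int)) (prev_rows : Int)
    (s : Int × Int × List String) (p : Int × String) : Int × Int × List String :=
  if p.1 = 0 then
    (s.1, s.2.1, s.2.2 ++ ["Row " ++ PySem.Int.toStr (p.1 + 1) ++ ": " ++ PySem.Int.toStr ((sp.getD (p.1 + 1) []).length : Int) ++ "sc in mR [" ++ PySem.Int.toStr ((sp.getD (p.1 + 1) []).length : Int) ++ "]"])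
  else
    if instr.get? (p.1 + 1) = some p.2 then
      ((if s.2.1 = 0 then p.1 else s.1), s.2.1 + 1,
        s.2.2 ++ (if PySem.Int.mod p.1 5 = 0 then [" "] else []))
    else
      (s.1, 0,
        s.2.2 ++ [if s.2.1 = 0 then
            "Row " ++ PySem.Int.toStr (p.1 + 1 + prev_rows) ++ ": " ++ p.2 ++ " [" ++ PySem.Int.toStr ((sp.getD (p.1 + 1) []).length : Int) ++ "]"
          else
            "Row " ++ PySem.Int.toStr (s.1 + 1 + prev_rows) ++ " - " ++ PySem.Int.toStr (p.1 + 1 + prev_rows) ++ ": " ++ p.2 ++ " [" ++ PySem.Int.toStr ((sp.getD (p.1 + 1) []).length : Int) ++ "]"]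
          ++ (if PySem.Int.mod p.1 5 = 0 then [" "] else []))

def pattern_to_str (instructions : List (Int × String)) (sample_points : List (Int × List Int)) (prev_rows : Int) : List String :=
  ((PySem.Dict.mk instructions).items.foldl
    (pvAstep (PySem.Dict.mk instructions) (PySem.Dict.mk sample_points) prev_rows)
    (0, 0, ([] : List String))).2.2

-- ===== PORT B =====
-- pass 1 of B: state = (start : Option Int, run-end table)
def pvB1step (instr : PySem.Dict Int String) (sp : PySem.Dict Int (List Int)) (prev_rows : Int)
    (s : Option Int × PySem.Dict Int String) (p : Int × String) : Option Int × PySem.Dict Int String :=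
  if p.1 = 0 then s
  else if instr.get? (p.1 + 1) = some p.2 then
    ((if s.1 = none then some p.1 else s.1), s.2)
  else
    (none, s.2.insert p.1 (match s.1 with
      | none => "Row " ++ PySem.Int.toStr (p.1 + 1 + prev_rows) ++ ": " ++ p.2 ++ " [" ++ PySem.Int.toStr ((sp.getD (p.1 + 1) []).length : Int) ++ "]"
      | some st => "Row " ++ PySem.Int.toStr (st + 1 + prev_rows) ++ " - " ++ PySem.Int.toStr (p.1 + 1 + prev_rows) ++ ": " ++ p.2 ++ " [" ++ PySem.Int.toStr ((sp.getD (p.1 + 1) []).length : Int) ++ "]"))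

-- pass 2 of B: assemble the text from the run-end table
def pvB2step (sp : PySem.Dict Int (List Int)) (tbl : PySem.Dict Int String)
    (text : List String) (p : Int × String) : List String :=
  if p.1 = 0 then
    text ++ ["Row 1: " ++ PySem.Int.toStr ((sp.getD 1 []).length : Int) ++ "sc in mR [" ++ PySem.Int.toStr ((sp.getD 1 []).length : Int) ++ "]"]
  else
    (match tbl.get? p.1 with
      | some t => text ++ [t]
      | none => text) ++ (if PySem.Int.mod p.1 5 = 0 then [" "] else [])

def pattern_to_str_alt (instructions : List (Int × String)) (sample_points : List (Int × List Int)) (prev_rows : Int) : List String :=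
  let instr := PySem.Dict.mk instructions
  let spd := PySem.Dict.mk sample_points
  let tbl := (instr.items.foldl (pvB1step instr spd prev_rows) (none, PySem.Dict.empty)).2
  instr.items.foldl (pvB2step spd tbl) []

-- ===== PRECONDITION & SPEC =====
-- Pre_ excludes (a) the inputs on which Python A raises KeyError looking up sample_points at a run
-- boundary (or at key 1 for index 0), and (b) association lists with duplicate instruction keys,
-- which do not represent any Python dict.
def Pre_pattern_to_str (instructions : List (Int × String)) (sample_points : List (Int × List Int)) (prev_rows : Int) : Prop :=
  (instructions.map Prod.fst).Nodup ∧
  ∀ p ∈ instructions,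
    (p.1 = 0 → (PySem.Dict.mk sample_points).contains 1 = true) ∧
    (p.1 ≠ 0 → (PySem.Dict.mk instructions).get? (p.1 + 1) ≠ some p.2 →
      (PySem.Dict.mk sample_points).contains (p.1 + 1) = true)
instance (instructions : List (Int × String)) (sample_points : List (Int × List Int)) (prev_rows : Int) : Decidable (Pre_pattern_to_str instructions sample_points prev_rows) := by unfold Pre_pattern_to_str; infer_instance
def pvWitness_pattern_to_str : (List (Int × String)) × (List (Int × List Int)) × Int :=
  ([(0, "sc"), (1, "inc"), (2, "inc"), (3, "dec")],
   [(1, [0, 0]), (2, [0]), (3, [0, 0, 0]), (4, [0])], 0)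

def Spec_pattern_to_str (instructions : List (Int × String)) (sample_points : List (Int × List Int)) (prev_rows : Int) (out : List String) : Prop := out = pattern_to_str_alt instructions sample_points prev_rows
instance (instructions : List (Int × String)) (sample_points : List (Int × List Int)) (prev_rows : Int) (out : List String) : Decidable (Spec_pattern_to_str instructions sample_points prev_rows out) := by unfold Spec_pattern_to_str; infer_instance

-- ===== CLAIM (what is proved, stated in full; the proofs are below) =====
def Claim_equal_pattern_to_str : Prop := ∀ (instructions : List (Int × String)) (sample_points : List (Int × List Int)) (prev_rows : Int), Dom_pattern_to_str instructions sample_points prev_rows → Pre_pattern_to_str instructions sample_points prev_rows → Spec_pattern_to_str instructions sample_points prev_rows (pattern_to_str instructions sample_points prev_rows)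

-- ===== LEMMAS AND PROOFS =====

-- pass 1 never touches a key that does not occur in the remaining items
lemma pvB1_get_preserve (instr : PySem.Dict Int String) (sp : PySem.Dict Int (List Int)) (prev_rows : Int) :
    ∀ (ys : List (Int × String)) (s : Option Int) (tbl : PySem.Dict Int String) (k : Int),
      k ∉ ys.map Prod.fst →
      ((ys.foldl (pvB1step instr sp prev_rows) (s, tbl)).2).get? k = tbl.get? k := by
  intro ys
  induction ys with
  | nil => intro s tbl k _; rfl
  | cons p ys ih =>
    intro s tbl k hk
    have hk1 : p.1 ≠ k := by
      intro h; exact hk (by simp [h])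
    have hk2 : k ∉ ys.map Prod.fst := fun h => hk (by simp [h])
    simp only [List.foldl_cons]
    rw [← Prod.mk.eta (p := pvB1step instr sp prev_rows (s, tbl) p), ih _ _ k hk2]
    unfold pvB1step
    split_ifs with h1 h2 <;>
      first
        | rfl
        | exact PySem.Dict.get?_insert_of_ne _ _ (Ne.symm hk1)

lemma pv_main (instr : PySem.Dict Int String) (sp : PySem.Dict Int (List Int)) (prev_rows : Int) :
    ∀ (xs : List (Int × String)) (rs c : Int) (start : Option Int) (tbl : PySem.Dict Int String)
      (text : List String),
      (xs.map Prod.fst).Nodup →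
      (∀ p ∈ xs, tbl.contains p.1 = false) →
      0 ≤ c →
      ((c = 0) ↔ (start = none)) →
      (∀ s0, start = some s0 → rs = s0) →
      (xs.foldl (pvAstep instr sp prev_rows) (rs, c, text)).2.2
        = xs.foldl (pvB2step sp ((xs.foldl (pvB1step instr sp prev_rows) (start, tbl)).2)) text := by
  intro xs
  induction xs with
  | nil => intro rs c start tbl text _ _ _ _ _; rfl
  | cons p ys ih =>
    intro rs c start tbl text hnd hfresh hcnn hiff hrs
    rw [List.map_cons, List.nodup_cons] at hnd
    obtain ⟨hp1, hndys⟩ := hnd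
    have hfreshys : ∀ q ∈ ys, tbl.contains q.1 = false :=
      fun q hq => hfresh q (List.mem_cons_of_mem _ hq)
    have hfhead : tbl.contains p.1 = false := hfresh p (List.mem_cons_self ..)
    simp only [List.foldl_cons]
    by_cases h0 : p.1 = 0
    · -- index 0: both sides append the mR row and leave the state alone
      have hA : pvAstep instr sp prev_rows (rs, c, text) p
          = (rs, c, text ++ ["Row 1: " ++ PySem.Int.toStr ((sp.getD 1 []).length : Int) ++ "sc in mR [" ++ PySem.Int.toStr ((sp.getD 1 []).length : Int) ++ "]"]) := by
        simp only [pvAstep, h0, zero_add, if_pos]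
        rw [show "Row " ++ PySem.Int.toStr 1 ++ ": " = "Row 1: " from rfl]
      have hB1 : pvB1step instr sp prev_rows (start, tbl) p = (start, tbl) := by
        simp [pvB1step, h0]
      have hB2 : ∀ tb : PySem.Dict Int String, pvB2step sp tb text p
          = text ++ ["Row 1: " ++ PySem.Int.toStr ((sp.getD 1 []).length : Int) ++ "sc in mR [" ++ PySem.Int.toStr ((sp.getD 1 []).length : Int) ++ "]"] := by
        intro tb; simp [pvB2step, h0]
      rw [hA, hB1, hB2]
      exact ih rs c start tbl _ hndys hfreshys hcnn hiff hrs
    · by_cases h2 : instr.get? (p.1 + 1) = some p.2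
      · -- inside a run: no row text, only a possible spacer
        have hA : pvAstep instr sp prev_rows (rs, c, text) p
            = ((if c = 0 then p.1 else rs), c + 1, text ++ (if PySem.Int.mod p.1 5 = 0 then [" "] else [])) := by
          simp [pvAstep, h0, h2]
        have hB1 : pvB1step instr sp prev_rows (start, tbl) p
            = ((if start = none then some p.1 else start), tbl) := by
          simp [pvB1step, h0, h2]
        rw [hA, hB1]
        have hT : ((ys.foldl (pvB1step instr sp prev_rows) ((if start = none then some p.1 else start), tbl)).2).get? p.1 = none := by
          rw [pvB1_get_preserve instr sp prev_rows ys _ tbl p.1 hp1]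
          rw [PySem.Dict.get?_eq_none_iff_contains]
          exact hfhead
        have hB2 : pvB2step sp ((ys.foldl (pvB1step instr sp prev_rows) ((if start = none then some p.1 else start), tbl)).2) text p
            = text ++ (if PySem.Int.mod p.1 5 = 0 then [" "] else []) := by
          simp only [pvB2step, if_neg h0, hT]
        rw [hB2]
        refine ih _ _ _ _ _ hndys hfreshys (by omega) ?_ ?_
        · constructor
          · intro h; omega
          · intro h
            by_cases hs : start = none
            · simp [hs] at h
            · simp [hs] at h
        · intro s0 hs0
          by_cases hc : c = 0
          · have : start = none := hiff.mp hc
            simp [this] at hs0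
            simp [hc, ← hs0]
          · have hsn : start ≠ none := fun h => hc (hiff.mpr h)
            rw [if_neg hsn] at hs0
            simp [hc]
            exact hrs s0 hs0
      · -- run boundary: the formatted row is emitted (A) / tabled then emitted (B)
        have hstart : (c = 0 ∧ start = none) ∨ (¬ c = 0 ∧ start = some rs) := by
          by_cases hc : c = 0
          · exact Or.inl ⟨hc, hiff.mp hc⟩
          · have hsn : start ≠ none := fun h => hc (hiff.mpr h)
            cases hs : start with
            | none => exact absurd hs hsn
            | some s0 => exact Or.inr ⟨hc, by rw [hrs s0 hs]⟩
        rcases hstart with ⟨hc, hs⟩ | ⟨hc, hs⟩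
        · have hA : pvAstep instr sp prev_rows (rs, c, text) p
              = (rs, 0, text ++ ["Row " ++ PySem.Int.toStr (p.1 + 1 + prev_rows) ++ ": " ++ p.2 ++ " [" ++ PySem.Int.toStr ((sp.getD (p.1 + 1) []).length : Int) ++ "]"] ++ (if PySem.Int.mod p.1 5 = 0 then [" "] else [])) := by
            simp [pvAstep, h0, h2, hc]
          have hB1 : pvB1step instr sp prev_rows (start, tbl) p
              = (none, tbl.insert p.1 ("Row " ++ PySem.Int.toStr (p.1 + 1 + prev_rows) ++ ": " ++ p.2 ++ " [" ++ PySem.Int.toStr ((sp.getD (p.1 + 1) []).length : Int) ++ "]")) := by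
            simp [pvB1step, h0, h2, hs]
          rw [hA, hB1]
          have hT : ((ys.foldl (pvB1step instr sp prev_rows) (none, tbl.insert p.1 ("Row " ++ PySem.Int.toStr (p.1 + 1 + prev_rows) ++ ": " ++ p.2 ++ " [" ++ PySem.Int.toStr ((sp.getD (p.1 + 1) []).length : Int) ++ "]"))).2).get? p.1 = some ("Row " ++ PySem.Int.toStr (p.1 + 1 + prev_rows) ++ ": " ++ p.2 ++ " [" ++ PySem.Int.toStr ((sp.getD (p.1 + 1) []).length : Int) ++ "]") := by
            rw [pvB1_get_preserve instr sp prev_rows ys _ _ p.1 hp1]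
            exact PySem.Dict.get?_insert_self _ _ _
          have hB2 : pvB2step sp ((ys.foldl (pvB1step instr sp prev_rows) (none, tbl.insert p.1 ("Row " ++ PySem.Int.toStr (p.1 + 1 + prev_rows) ++ ": " ++ p.2 ++ " [" ++ PySem.Int.toStr ((sp.getD (p.1 + 1) []).length : Int) ++ "]"))).2) text p
              = text ++ ["Row " ++ PySem.Int.toStr (p.1 + 1 + prev_rows) ++ ": " ++ p.2 ++ " [" ++ PySem.Int.toStr ((sp.getD (p.1 + 1) []).length : Int) ++ "]"] ++ (if PySem.Int.mod p.1 5 = 0 then [" "] else []) := by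
            simp only [pvB2step, if_neg h0, hT]
          rw [hB2]
          refine ih _ _ _ _ _ hndys ?_ le_rfl (by simp) (by simp)
          intro q hq
          rw [PySem.Dict.contains_insert]
          have hqne : q.1 ≠ p.1 := fun h => hp1 (h ▸ List.mem_map_of_mem hq)
          simp [hqne, hfreshys q hq]
        · have hA : pvAstep instr sp prev_rows (rs, c, text) p
              = (rs, 0, text ++ ["Row " ++ PySem.Int.toStr (rs + 1 + prev_rows) ++ " - " ++ PySem.Int.toStr (p.1 + 1 + prev_rows) ++ ": " ++ p.2 ++ " [" ++ PySem.Int.toStr ((sp.getD (p.1 + 1) []).length : Int) ++ "]"] ++ (if PySem.Int.mod p.1 5 = 0 then [" "] else [])) := by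
            simp [pvAstep, h0, h2, hc]
          have hB1 : pvB1step instr sp prev_rows (start, tbl) p
              = (none, tbl.insert p.1 ("Row " ++ PySem.Int.toStr (rs + 1 + prev_rows) ++ " - " ++ PySem.Int.toStr (p.1 + 1 + prev_rows) ++ ": " ++ p.2 ++ " [" ++ PySem.Int.toStr ((sp.getD (p.1 + 1) []).length : Int) ++ "]")) := by
            simp [pvB1step, h0, h2, hs]
          rw [hA, hB1]
          have hT : ((ys.foldl (pvB1step instr sp prev_rows) (none, tbl.insert p.1 ("Row " ++ PySem.Int.toStr (rs + 1 + prev_rows) ++ " - " ++ PySem.Int.toStr (p.1 + 1 + prev_rows) ++ ": " ++ p.2 ++ " [" ++ PySem.Int.toStr ((sp.getD (p.1 + 1) []).length : Int) ++ "]"))).2).get? p.1 = some ("Row " ++ PySem.Int.toStr (rs + 1 + prev_rows) ++ " - " ++ PySem.Int.toStr (p.1 + 1 + prev_rows) ++ ": " ++ p.2 ++ " [" ++ PySem.Int.toStr ((sp.getD (p.1 + 1) []).length : Int) ++ "]") := by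
            rw [pvB1_get_preserve instr sp prev_rows ys _ _ p.1 hp1]
            exact PySem.Dict.get?_insert_self _ _ _
          have hB2 : pvB2step sp ((ys.foldl (pvB1step instr sp prev_rows) (none, tbl.insert p.1 ("Row " ++ PySem.Int.toStr (rs + 1 + prev_rows) ++ " - " ++ PySem.Int.toStr (p.1 + 1 + prev_rows) ++ ": " ++ p.2 ++ " [" ++ PySem.Int.toStr ((sp.getD (p.1 + 1) []).length : Int) ++ "]"))).2) text p
              = text ++ ["Row " ++ PySem.Int.toStr (rs + 1 + prev_rows) ++ " - " ++ PySem.Int.toStr (p.1 + 1 + prev_rows) ++ ": " ++ p.2 ++ " [" ++ PySem.Int.toStr ((sp.getD (p.1 + 1) []).length : Int) ++ "]"] ++ (if PySem.Int.mod p.1 5 = 0 then [" "] else []) := by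
            simp only [pvB2step, if_neg h0, hT]
          rw [hB2]
          refine ih _ _ _ _ _ hndys ?_ le_rfl (by simp) (by simp)
          intro q hq
          rw [PySem.Dict.contains_insert]
          have hqne : q.1 ≠ p.1 := fun h => hp1 (h ▸ List.mem_map_of_mem hq)
          simp [hqne, hfreshys q hq]

-- ===== VERDICT (by name: the statement is the Claim_ definition above) =====
theorem pattern_to_str_spec : Claim_equal_pattern_to_str := by
  intro instructions sample_points prev_rows _ hpre
  unfold Spec_pattern_to_str pattern_to_str pattern_to_str_alt
  exact pv_main (PySem.Dict.mk instructions) (PySem.Dict.mk sample_points) prev_rows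
    instructions 0 0 none PySem.Dict.empty []
    hpre.1 (fun q _ => PySem.Dict.contains_empty q.1) le_rfl (by simp) (fun s0 h => by simp at h)
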